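-- pv_equiv track=rewrite | github.com/HelgeSverre/python-music-generation | random/pygame_generate.py | create_bassline
-- ===== SOURCE A (Python) =====
-- def create_bassline(bassline_root_notes, bars=4):
--     """Create an offbeat bassline based on the root notes of the chord progression."""
--     bassline = []
--     for bar in range(bars):
--         root_note = bassline_root_notes[bar % len(bassline_root_notes)]
--         # Add offbeat bassline (on the 'and' of every beat)
--         bassline.extend(
--             [0, root_note - 12, 0, root_note - 12, 0, root_note - 12, 0, root_note - 12]
--         )  # 16th notes
--     return bassline
-- ===== SOURCE B (Python) =====
-- def create_bassline(bassline_root_notes, bars=4):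
--     """Create an offbeat bassline based on the root notes of the chord progression."""
--     return [
--         0 if i % 2 == 0 else bassline_root_notes[(i // 8) % len(bassline_root_notes)] - 12
--         for i in range(bars * 8)
--     ]
-- ===== Notes on version B (the rewrite author's own statement) =====
-- stated objective: alternative
-- what changed: Replaces the per-bar loop that extends a hard-coded 8-element block with one flat comprehension over all sixteenth-note slots, computing each slot from its index (0 on even slots, root-12 on odd slots, bar = i//8).
import Mathlib
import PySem

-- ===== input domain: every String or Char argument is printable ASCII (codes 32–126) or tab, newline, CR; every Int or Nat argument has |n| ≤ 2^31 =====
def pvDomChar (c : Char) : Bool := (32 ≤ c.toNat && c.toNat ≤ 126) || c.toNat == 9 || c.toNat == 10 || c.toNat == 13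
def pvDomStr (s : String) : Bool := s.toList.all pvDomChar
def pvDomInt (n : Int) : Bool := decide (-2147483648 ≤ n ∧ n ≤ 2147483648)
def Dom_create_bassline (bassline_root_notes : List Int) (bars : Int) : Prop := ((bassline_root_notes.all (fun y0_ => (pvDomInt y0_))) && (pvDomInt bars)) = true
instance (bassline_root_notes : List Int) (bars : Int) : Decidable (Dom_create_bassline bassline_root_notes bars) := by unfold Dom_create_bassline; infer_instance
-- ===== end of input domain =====

-- B replaces the per-bar extend-a-fixed-block loop with one flat index-driven map over all sixteenth-note slots (alternative decomposition, same cost).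


-- ===== PORT A =====
def create_bassline (bassline_root_notes : List Int) (bars : Int) : List Int :=
  (PySem.List.pyRange 0 bars 1).foldl
    (fun bassline bar =>
      let root_note := PySem.List.pyGetD bassline_root_notes
        (PySem.Int.mod bar (PySem.List.len bassline_root_notes)) 0
      bassline ++ [0, root_note - 12, 0, root_note - 12, 0, root_note - 12, 0, root_note - 12])
    []

-- ===== PORT B =====
def create_bassline_alt (bassline_root_notes : List Int) (bars : Int) : List Int :=
  (PySem.List.pyRange 0 (bars * 8) 1).map
    (fun i =>
      if PySem.Int.mod i 2 = 0 then 0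
      else PySem.List.pyGetD bassline_root_notes
        (PySem.Int.mod (PySem.Int.floordiv i 8) (PySem.List.len bassline_root_notes)) 0 - 12)

-- ===== PRECONDITION & SPEC =====
-- Pre_ excludes exactly the inputs where Python A raises ZeroDivisionError (bars > 0 with an empty root list).
def Pre_create_bassline (bassline_root_notes : List Int) (bars : Int) : Prop :=
  bars ≤ 0 ∨ bassline_root_notes ≠ []
instance (bassline_root_notes : List Int) (bars : Int) : Decidable (Pre_create_bassline bassline_root_notes bars) := by unfold Pre_create_bassline; infer_instance

def pvWitness_create_bassline : List Int × Int := ([60, 57], 2)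

def Spec_create_bassline (bassline_root_notes : List Int) (bars : Int) (out : List Int) : Prop := out = create_bassline_alt bassline_root_notes bars
instance (bassline_root_notes : List Int) (bars : Int) (out : List Int) : Decidable (Spec_create_bassline bassline_root_notes bars out) := by unfold Spec_create_bassline; infer_instance

-- ===== CLAIM (what is proved, stated in full; the proofs are below) =====
def Claim_equal_create_bassline : Prop := ∀ (bassline_root_notes : List Int) (bars : Int), Dom_create_bassline bassline_root_notes bars → Pre_create_bassline bassline_root_notes bars → Spec_create_bassline bassline_root_notes bars (create_bassline bassline_root_notes bars)

-- ===== LEMMAS AND PROOFS =====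

-- range(a, a+8) as an explicit eight-element list
lemma pyRange_eight (a : Int) :
    PySem.List.pyRange a (a + 8) 1 = [a, a+1, a+2, a+3, a+4, a+5, a+6, a+7] := by
  rw [PySem.List.pyRange_one]
  norm_num [show Int.toNat 8 = 8 from rfl, List.range_succ]

-- the main loop correspondence, for a natural number of bars
lemma create_bassline_key (xs : List Int) (n : Nat) :
    create_bassline xs (n : Int) = create_bassline_alt xs (n : Int) := by
  unfold create_bassline create_bassline_alt
  induction n with
  | zero => simp [PySem.List.pyRange_one_eq_nil]
  | succ m ih =>
    have h1 : ((m + 1 : Nat) : Int) = (m : Int) + 1 := by push_cast; ring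
    rw [h1]
    rw [show ((m : Int) + 1) * 8 = (m : Int) * 8 + 8 from by ring]
    rw [PySem.List.pyRange_one_succ_right (by positivity),
        PySem.List.pyRange_one_append 0 ((m : Int) * 8) ((m : Int) * 8 + 8)
          (by positivity) (by omega)]
    rw [List.foldl_append, List.map_append, ih]
    rw [pyRange_eight]
    have hdiv : ∀ j : Int, 0 ≤ j → j < 8 →
        PySem.Int.floordiv ((m : Int) * 8 + j) 8 = (m : Int) := by
      intro j hj0 hj8
      rw [PySem.Int.floordiv_eq_ediv_of_pos (by omega)]
      omega
    have heven : ∀ j : Int, j % 2 = 0 → PySem.Int.mod ((m : Int) * 8 + j) 2 = 0 := by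
      intro j hj
      rw [PySem.Int.mod_eq_emod_of_pos (by omega)]
      omega
    have hodd : ∀ j : Int, j % 2 = 1 → PySem.Int.mod ((m : Int) * 8 + j) 2 ≠ 0 := by
      intro j hj
      rw [PySem.Int.mod_eq_emod_of_pos (by omega)]
      omega
    have e0 : PySem.Int.mod ((m : Int) * 8) 2 = 0 := by
      rw [PySem.Int.mod_eq_emod_of_pos (by omega)]; omega
    have d0 : PySem.Int.floordiv ((m : Int) * 8) 8 = (m : Int) := by
      rw [PySem.Int.floordiv_eq_ediv_of_pos (by omega)]; omega
    simp only [List.map_cons, List.map_nil]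
    rw [if_pos e0, if_neg (hodd 1 (by decide)),
        if_pos (heven 2 (by decide)), if_neg (hodd 3 (by decide)),
        if_pos (heven 4 (by decide)), if_neg (hodd 5 (by decide)),
        if_pos (heven 6 (by decide)), if_neg (hodd 7 (by decide)),
        hdiv 1 (by omega) (by omega), hdiv 3 (by omega) (by omega),
        hdiv 5 (by omega) (by omega), hdiv 7 (by omega) (by omega)]
    rfl

-- ===== VERDICT (by name: the statement is the Claim_ definition above) =====
theorem create_bassline_spec : Claim_equal_create_bassline := by
  intro xs bars _ _
  unfold Spec_create_bassline
  by_cases h : bars ≤ 0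
  · unfold create_bassline create_bassline_alt
    rw [PySem.List.pyRange_one_eq_nil (by omega),
        PySem.List.pyRange_one_eq_nil (by omega)]
    rfl
  · have h' : bars = (bars.toNat : Int) := by omega
    rw [h']
    exact create_bassline_key xs bars.toNat
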